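-- pv_equiv track=rewrite | github.com/Sekvens/Cryptology | lab1/encryptcracker.py | getSubCipherList
-- ===== SOURCE A (Python) =====
-- def getSubCipherList(cipherText, mPrime):
--     subCipherList = []
--     for i in range(mPrime): #Create a list with N empty strings
--         subCipherList.append("")
--     index = 0
--     for char in cipherText:
--         subCipherList[index % mPrime] += char
--         index += 1
--     return subCipherList
-- ===== SOURCE B (Python) =====
-- def getSubCipherList(cipherText, mPrime):
--     return [cipherText[j::mPrime] for j in range(mPrime)]
-- ===== Notes on version B (the rewrite author's own statement) =====
-- stated objective: idiomatic
-- what changed: Replaces A's allocate-empty-buckets-then-route-every-character loop with a comprehension of strided slices cipherText[j::mPrime], computing each bucket directly (measured constant-factor speedup: C-level slicing instead of a per-character Python loop).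
import Mathlib
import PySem

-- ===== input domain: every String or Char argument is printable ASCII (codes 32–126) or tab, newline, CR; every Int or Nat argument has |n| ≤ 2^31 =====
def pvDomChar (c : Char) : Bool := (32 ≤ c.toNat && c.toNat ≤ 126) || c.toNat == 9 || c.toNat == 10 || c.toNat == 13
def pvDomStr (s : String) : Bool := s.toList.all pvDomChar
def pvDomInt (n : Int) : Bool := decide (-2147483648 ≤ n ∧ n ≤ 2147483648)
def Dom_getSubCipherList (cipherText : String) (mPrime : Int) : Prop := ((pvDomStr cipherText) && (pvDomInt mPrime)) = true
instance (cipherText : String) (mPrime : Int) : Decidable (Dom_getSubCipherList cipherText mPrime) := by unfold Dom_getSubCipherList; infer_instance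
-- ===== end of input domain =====

-- B replaces A's allocate-buckets-then-route-each-character loop with a comprehension of
-- strided slices cipherText[j::mPrime] (idiomatic; same asymptotic cost).

-- ===== PORT A =====
def getSubCipherList (cipherText : String) (mPrime : Int) : List String :=
  -- subCipherList = []; for i in range(mPrime): subCipherList.append("")
  let subCipherList : List String :=
    (PySem.List.pyRange 0 mPrime 1).foldl (fun acc _ => acc ++ [""]) []
  -- index = 0; for char in cipherText: subCipherList[index % mPrime] += char; index += 1
  -- (inside Pre_ the index 'index % mPrime' is always in range, so set/getD are exact there)
  let final :=
    cipherText.toList.foldl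
      (fun (st : List String × Int) c =>
        (st.1.set (PySem.Int.mod st.2 mPrime).toNat
          (st.1.getD (PySem.Int.mod st.2 mPrime).toNat "" ++ c.toString), st.2 + 1))
      (subCipherList, 0)
  final.1

-- ===== PORT B =====
def getSubCipherList_alt (cipherText : String) (mPrime : Int) : List String :=
  -- [cipherText[j::mPrime] for j in range(mPrime)]  (whenever the range is non-empty the
  -- step mPrime is positive, so the slice never raises; getD [] only discharges the Option)
  (PySem.List.pyRange 0 mPrime 1).map
    (fun j => String.ofList ((PySem.List.slice? cipherText.toList (some j) none mPrime).getD []))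

-- ===== PRECONDITION & SPEC =====
-- Pre_ excludes exactly the inputs on which A raises: mPrime ≤ 0 with non-empty cipherText
-- (ZeroDivisionError for mPrime == 0, IndexError for mPrime < 0).
def Pre_getSubCipherList (cipherText : String) (mPrime : Int) : Prop :=
  0 < mPrime ∨ cipherText = ""
instance (cipherText : String) (mPrime : Int) : Decidable (Pre_getSubCipherList cipherText mPrime) := by unfold Pre_getSubCipherList; infer_instance
def pvWitness_getSubCipherList : String × Int := ("attackatdawn", 3)

def Spec_getSubCipherList (cipherText : String) (mPrime : Int) (out : List String) : Prop := out = getSubCipherList_alt cipherText mPrime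
instance (cipherText : String) (mPrime : Int) (out : List String) : Decidable (Spec_getSubCipherList cipherText mPrime out) := by unfold Spec_getSubCipherList; infer_instance

-- ===== CLAIM (what is proved, stated in full; the proofs are below) =====
def Claim_equal_getSubCipherList : Prop := ∀ (cipherText : String) (mPrime : Int), Dom_getSubCipherList cipherText mPrime → Pre_getSubCipherList cipherText mPrime → Spec_getSubCipherList cipherText mPrime (getSubCipherList cipherText mPrime)
-- ===== LEMMAS AND PROOFS =====

-- the characters B's slice cs[j::m] yields
def pvStride (m : Int) (cs : List Char) (j : Int) : List Char :=
  (PySem.List.slice? cs (some j) none m).getD []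

-- the characters A's loop appends to bucket p while scanning cs with running index idx
def pvBucket (m : Int) (cs : List Char) (idx : Int) (p : Nat) : List Char :=
  match cs with
  | [] => []
  | c :: rest =>
      (if (PySem.Int.mod idx m).toNat = p then [c] else []) ++ pvBucket m rest (idx + 1) p

theorem pvStride_nil (m j : Int) (hm : 0 < m) (hj : 0 ≤ j) : pvStride m [] j = [] := by
  simp only [pvStride, PySem.List.slice?, PySem.List.sliceIndices]
  split_ifs <;> simp_all

theorem pvStride_cons_pos (m j : Int) (c : Char) (cs : List Char) (hm : 0 < m) (hj : 1 ≤ j) :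
    pvStride m (c :: cs) j = pvStride m cs (j - 1) := by
  have h1 : ¬ (m = 0) := by omega
  have h2 : ¬ (m < 0) := by omega
  have h3 : ¬ (j < 0) := by omega
  have h4 : ¬ (j - 1 < 0) := by omega
  simp only [pvStride, PySem.List.slice?, PySem.List.sliceIndices, if_neg h1, if_neg h2,
    if_neg h3, if_neg h4, Option.getD_some, List.length_cons, if_pos hm]
  push_cast
  have hmin : min j ((cs.length : Int) + 1) = min (j - 1) (cs.length : Int) + 1 := by omega
  rw [hmin]
  set n : Int := (cs.length : Int) with hn
  set e : Int := min (j - 1) n with he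
  congr 1
  · funext x
    have hmx : 0 ≤ m * (x : Int) := by positivity
    have he0 : 0 ≤ e := by omega
    have : (e + 1 + m * (x : Int)).toNat = (e + m * (x : Int)).toNat + 1 := by omega
    rw [this, List.getElem?_cons_succ]
  · by_cases h : e < n
    · rw [if_pos (by omega), if_pos h]
      have : n + 1 - (e + 1) + m - 1 = n - e + m - 1 := by ring
      rw [this]
    · rw [if_neg (by omega), if_neg h]

theorem pvStride_cons_zero (m : Int) (c : Char) (cs : List Char) (hm : 0 < m) :
    pvStride m (c :: cs) 0 = c :: pvStride m cs (m - 1) := by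
  have h1 : ¬ (m = 0) := by omega
  have h2 : ¬ (m < 0) := by omega
  have h3 : ¬ ((0:Int) < 0) := by omega
  have h4 : ¬ (m - 1 < 0) := by omega
  simp only [pvStride, PySem.List.slice?, PySem.List.sliceIndices, if_neg h1, if_neg h2,
    if_neg h3, if_neg h4, Option.getD_some, List.length_cons, if_pos hm]
  push_cast
  set n : Int := (cs.length : Int) with hn
  have hn0 : 0 ≤ n := by positivity
  have hmin0 : min (0:Int) (n + 1) = 0 := by omega
  rw [hmin0]
  have hdiv : n + 1 - 0 + m - 1 = n + 1 * m := by ring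
  rw [if_pos (by omega : (0:Int) < n + 1), hdiv, Int.add_mul_ediv_right _ _ (by omega : m ≠ 0)]
  have hq0 : 0 ≤ n / m := Int.ediv_nonneg hn0 (by omega)
  have hcnt : (n / m + 1).toNat = (n / m).toNat + 1 := by omega
  rw [hcnt, List.range_succ_eq_map, List.filterMap_cons]
  simp only [zero_add]
  norm_num
  by_cases h : (m - 1 : Int) < n
  · rw [if_pos (by omega : m ≤ n), show min (m - 1) n = m - 1 from by omega,
      show n - (m - 1) + m - 1 = n from by ring]
    congr 1
    funext x
    have hmx : 0 ≤ m * (x : Int) := by positivity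
    have hidx : (m * ((x : Int) + 1)).toNat = (m - 1 + m * (x : Int)).toNat + 1 := by
      have : m * ((x : Int) + 1) = m + m * x := by ring
      omega
    rw [hidx, List.getElem?_cons_succ]
  · have hq : n / m = 0 := Int.ediv_eq_zero_of_lt hn0 (by omega)
    rw [hq, if_neg (by omega : ¬ m ≤ n)]
    simp

theorem pvEmod_sub_one_of_pos (m x : Int) (hm : 0 < m) (h : 1 ≤ x % m) :
    (x - 1) % m = x % m - 1 := by
  have hx : x - 1 = (x % m - 1) + m * (x / m) := by
    have := Int.mul_ediv_add_emod x m; linarith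
  rw [hx, Int.add_mul_emod_self_left]
  exact Int.emod_eq_of_lt (by omega) (by have := Int.emod_lt_of_pos x hm; omega)

theorem pvEmod_sub_one_of_zero (m x : Int) (hm : 0 < m) (h : x % m = 0) :
    (x - 1) % m = m - 1 := by
  have hx : x - 1 = (m - 1) + m * (x / m - 1) := by
    have := Int.mul_ediv_add_emod x m; linarith
  rw [hx, Int.add_mul_emod_self_left]
  exact Int.emod_eq_of_lt (by omega) (by omega)

theorem pvBucket_eq_stride (m : Int) (p : Nat) (hm : 0 < m) (hp : (p : Int) < m) :
    ∀ (cs : List Char) (idx : Int),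
      pvBucket m cs idx p = pvStride m cs (PySem.Int.mod ((p : Int) - idx) m) := by
  intro cs
  induction cs with
  | nil =>
    intro idx
    simp only [pvBucket]
    exact (pvStride_nil m _ hm (PySem.Int.mod_nonneg _ hm)).symm
  | cons c rest ih =>
    intro idx
    have hmod : ∀ x : Int, PySem.Int.mod x m = x % m := fun x => PySem.Int.mod_eq_emod_of_pos hm
    have hidr1 : 0 ≤ idx % m := Int.emod_nonneg idx (by omega)
    have hidr2 : idx % m < m := Int.emod_lt_of_pos idx hm
    have hshift : ((p : Int) - idx) % m = ((p : Int) - idx % m) % m := by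
      conv_lhs => rw [show (p : Int) - idx = ((p : Int) - idx % m) + m * (-(idx / m)) from by
        have := Int.mul_ediv_add_emod idx m; ring_nf; linarith]
      rw [Int.add_mul_emod_self_left]
    simp only [pvBucket, hmod]
    by_cases hc : (idx % m).toNat = p
    · have hrp : idx % m = (p : Int) := by omega
      have hj0 : ((p : Int) - idx) % m = 0 := by rw [hshift, hrp]; simp
      rw [if_pos hc, hj0, pvStride_cons_zero m c rest hm, ih (idx + 1), hmod]
      have hm1 : ((p : Int) - (idx + 1)) % m = m - 1 := by
        rw [show (p : Int) - (idx + 1) = ((p : Int) - idx) - 1 from by ring]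
        exact pvEmod_sub_one_of_zero m _ hm hj0
      rw [hm1]
      simp
    · have hrp : idx % m ≠ (p : Int) := by omega
      have hj1 : 1 ≤ ((p : Int) - idx) % m := by
        rw [hshift]
        rcases lt_or_gt_of_ne hrp with h | h
        · rw [Int.emod_eq_of_lt (by omega) (by omega)]; omega
        · have key : ((p : Int) - idx % m + m) % m = ((p : Int) - idx % m) % m := by
            have := Int.add_mul_emod_self_left (a := (p : Int) - idx % m) (b := m) (c := 1)
            simpa using this
          have : ((p : Int) - idx % m) % m = (p : Int) - idx % m + m := by
            rw [← key]; exact Int.emod_eq_of_lt (by omega) (by omega)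
          omega
      rw [if_neg hc, ih (idx + 1), hmod, pvStride_cons_pos m _ c rest hm hj1]
      have hm1 : ((p : Int) - (idx + 1)) % m = ((p : Int) - idx) % m - 1 := by
        rw [show (p : Int) - (idx + 1) = ((p : Int) - idx) - 1 from by ring]
        exact pvEmod_sub_one_of_pos m _ hm hj1
      rw [hm1]
      simp

-- A's first loop appends "" once per range element
theorem pvInit_eq (L : List Int) (acc : List String) :
    L.foldl (fun acc _ => acc ++ [""]) acc = acc ++ List.replicate L.length "" := by
  induction L generalizing acc with
  | nil => simp
  | cons x xs ih =>
    rw [List.foldl_cons, ih]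
    simp [List.replicate_succ]

-- A's second loop preserves the length of the bucket list
theorem pvLoop_length (m : Int) (cs : List Char) :
    ∀ (l : List String) (idx : Int),
      (cs.foldl
        (fun (st : List String × Int) c =>
          (st.1.set (PySem.Int.mod st.2 m).toNat
            (st.1.getD (PySem.Int.mod st.2 m).toNat "" ++ c.toString), st.2 + 1))
        (l, idx)).1.length = l.length := by
  induction cs with
  | nil => intro l idx; simp
  | cons c rest ih =>
    intro l idx
    rw [List.foldl_cons, ih]
    simp

-- A's second loop, element p: the old content extended by pvBucket
theorem pvLoop_getElem? (m : Int) (hm : 0 < m) (cs : List Char) :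
    ∀ (l : List String) (idx : Int) (p : Nat), l.length = m.toNat → p < l.length →
      (cs.foldl
        (fun (st : List String × Int) c =>
          (st.1.set (PySem.Int.mod st.2 m).toNat
            (st.1.getD (PySem.Int.mod st.2 m).toNat "" ++ c.toString), st.2 + 1))
        (l, idx)).1[p]? = some (l.getD p "" ++ String.ofList (pvBucket m cs idx p)) := by
  induction cs with
  | nil =>
    intro l idx p hl hp
    simp only [List.foldl_nil, pvBucket]
    rw [List.getElem?_eq_getElem hp, List.getD_eq_getElem l "" hp]
    simp
  | cons c rest ih =>
    intro l idx p hl hp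
    have hr0 : 0 ≤ PySem.Int.mod idx m := PySem.Int.mod_nonneg idx hm
    have hrm : PySem.Int.mod idx m < m := PySem.Int.mod_lt idx hm
    have hr : (PySem.Int.mod idx m).toNat < l.length := by omega
    rw [List.foldl_cons,
      ih _ _ p (by simp [hl]) (by simpa using hp)]
    simp only [pvBucket]
    by_cases hc : (PySem.Int.mod idx m).toNat = p
    · subst hc
      rw [List.getD_eq_getElem?_getD, List.getElem?_set_self hr, List.getD_eq_getElem?_getD,
        List.getElem?_eq_getElem hr]
      apply congrArg
      apply String.ext
      simp
    · rw [List.getD_eq_getElem?_getD, List.getElem?_set_ne hc, ← List.getD_eq_getElem?_getD]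
      rw [if_neg hc]
      apply congrArg
      apply String.ext
      simp

theorem pvMain (s : String) (m : Int) (hm : 0 < m) :
    getSubCipherList s m = getSubCipherList_alt s m := by
  simp only [getSubCipherList, getSubCipherList_alt]
  rw [pvInit_eq]
  simp only [List.nil_append, PySem.List.length_pyRange_one, Int.sub_zero]
  apply List.ext_getElem?
  intro p
  by_cases hp : p < m.toNat
  · rw [pvLoop_getElem? m hm _ _ _ p (by simp) (by simpa using hp)]
    rw [List.getElem?_map, PySem.List.getElem?_pyRange_one]
    rw [if_pos (by simpa using hp)]
    have hbs := pvBucket_eq_stride m p hm (by omega) s.toList 0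
    rw [hbs]
    have hmp : PySem.Int.mod ((p : Int) - 0) m = (p : Int) := by
      rw [PySem.Int.mod_eq_emod_of_pos hm]
      simp only [sub_zero]
      exact Int.emod_eq_of_lt (by positivity) (by omega)
    rw [hmp]
    simp only [Option.map_some, zero_add, pvStride]
    apply congrArg
    apply String.ext
    rw [List.getD_eq_getElem (List.replicate m.toNat "") "" (by simpa using hp),
      List.getElem_replicate]
    simp
  · rw [List.getElem?_eq_none, List.getElem?_eq_none]
    · simp only [List.length_map, PySem.List.length_pyRange_one]
      omega
    · rw [pvLoop_length]
      simp only [List.length_replicate]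
      omega

-- ===== VERDICT (by name: the statement is the Claim_ definition above) =====
theorem getSubCipherList_spec : Claim_equal_getSubCipherList := by
  intro s m _ hpre
  unfold Spec_getSubCipherList
  by_cases hm : 0 < m
  · exact pvMain s m hm
  · have hs : s = "" := by
      rcases hpre with h | h
      · omega
      · exact h
    subst hs
    have hr : PySem.List.pyRange 0 m 1 = [] := PySem.List.pyRange_one_eq_nil (by omega)
    simp [getSubCipherList, getSubCipherList_alt, hr]
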